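-- pv_equiv track=rewrite | github.com/Inf3n0s/google_foobar | babybomb/main.py | solution
-- ===== SOURCE A (Python) =====
-- def aregood(m,f):
--     if(m==1 and f==1):
--         return True
--     if(m>0 and f>0):
--         if(m != f):
--             return True
--     return False
--
-- def solution(m,f):
--     m = int(m)
--     f = int(f)
--     step = -1
--     while(m>1 or f>1):
--         if(aregood(m,f)==False):
--             return "impossible"
--         else:
--             if(m>f):
--                 step += m//f
--                 m=m-f*(m//f)
--             else:
--                 step += f//m
--                 f=f-m*(f//m)
--     return str(step)
-- ===== SOURCE B (Python) =====
-- def solution(m, f):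
--     def rec(a, b, step):
--         if a <= 1 and b <= 1:
--             return str(step)
--         if a <= 0 or b <= 0 or a == b:
--             return "impossible"
--         if a > b:
--             return rec(a % b, b, step + a // b)
--         return rec(a, b % a, step + b // a)
--     return rec(int(m), int(f), -1)
-- ===== Notes on version B (the rewrite author's own statement) =====
-- stated objective: simpler
-- what changed: Replaced the while-loop with mutable state and the separate aregood() predicate by a self-contained recursive Euclid helper rec(a,b,step) with inlined base/impossible conditions.
import Mathlib
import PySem

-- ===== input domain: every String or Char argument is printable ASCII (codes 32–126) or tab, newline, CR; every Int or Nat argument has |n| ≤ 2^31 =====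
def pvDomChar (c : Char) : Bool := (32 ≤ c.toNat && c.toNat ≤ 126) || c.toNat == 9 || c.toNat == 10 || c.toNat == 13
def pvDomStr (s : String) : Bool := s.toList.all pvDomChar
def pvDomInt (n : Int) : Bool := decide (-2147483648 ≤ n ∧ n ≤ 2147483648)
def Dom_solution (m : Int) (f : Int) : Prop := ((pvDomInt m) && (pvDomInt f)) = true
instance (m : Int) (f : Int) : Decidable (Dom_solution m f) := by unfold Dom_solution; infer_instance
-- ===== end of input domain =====

-- B replaces A's while-loop plus external aregood() predicate by a self-contained
-- recursive Euclid helper with inlined base/impossible conditions (objective: simpler).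
-- Both loops iterate at most (m+f).toNat times (the positive state sum strictly
-- decreases), so the structural fuel (m+f).toNat + 1 is never exhausted.

-- ===== PORT A =====
def aregood (m : Int) (f : Int) : Bool :=
  if m = 1 ∧ f = 1 then true
  else if m > 0 ∧ f > 0 then (if m ≠ f then true else false)
  else false

-- the while-loop of A, state (m, f, step); fuel only ticks on iterations and never runs out
def solutionLoop (fuel : Nat) (m : Int) (f : Int) (step : Int) : String :=
  match fuel with
  | 0 => "impossible"  -- unreachable with the fuel solution supplies
  | fuel + 1 =>
    if m > 1 ∨ f > 1 then
      if aregood m f = false then "impossible"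
      else
        if m > f then
          solutionLoop fuel (m - f * PySem.Int.floordiv m f) f (step + PySem.Int.floordiv m f)
        else
          solutionLoop fuel m (f - m * PySem.Int.floordiv f m) (step + PySem.Int.floordiv f m)
    else PySem.Int.toStr step

def solution (m : Int) (f : Int) : String :=
  solutionLoop ((m + f).toNat + 1) m f (-1)

-- ===== PORT B =====
def solutionRec (fuel : Nat) (a : Int) (b : Int) (step : Int) : String :=
  match fuel with
  | 0 => "impossible"  -- unreachable with the fuel solution_alt supplies
  | fuel + 1 =>
    if a ≤ 1 ∧ b ≤ 1 then PySem.Int.toStr step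
    else if a ≤ 0 ∨ b ≤ 0 ∨ a = b then "impossible"
    else if a > b then
      solutionRec fuel (PySem.Int.mod a b) b (step + PySem.Int.floordiv a b)
    else
      solutionRec fuel a (PySem.Int.mod b a) (step + PySem.Int.floordiv b a)

def solution_alt (m : Int) (f : Int) : String :=
  solutionRec ((m + f).toNat + 1) m f (-1)

-- ===== PRECONDITION & SPEC =====
def Spec_solution (m : Int) (f : Int) (out : String) : Prop := out = solution_alt m f
instance (m : Int) (f : Int) (out : String) : Decidable (Spec_solution m f out) := by unfold Spec_solution; infer_instance

-- ===== CLAIM (what is proved, stated in full; the proofs are below) =====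
def Claim_equal_solution : Prop := ∀ (m : Int) (f : Int), Dom_solution m f → Spec_solution m f (solution m f)

-- ===== LEMMAS AND PROOFS =====

theorem aregood_true_cases {m f : Int} (h : aregood m f = true) :
    (m = 1 ∧ f = 1) ∨ (0 < m ∧ 0 < f ∧ m ≠ f) := by
  unfold aregood at h; split_ifs at h <;> tauto

theorem aregood_false_cases {m f : Int} (h : aregood m f = false) :
    m ≤ 0 ∨ f ≤ 0 ∨ m = f := by
  unfold aregood at h; split_ifs at h with h1 h2 h3 <;> omega

theorem loop_eq_rec : ∀ (fuel : Nat) (m f step : Int),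
    solutionLoop fuel m f step = solutionRec fuel m f step := by
  intro fuel
  induction fuel with
  | zero => intro m f step; rfl
  | succ k ih =>
    intro m f step
    rw [solutionLoop, solutionRec]
    by_cases h : m > 1 ∨ f > 1
    · rw [if_pos h]
      by_cases hg : aregood m f = false
      · rw [if_pos hg]
        have hc := aregood_false_cases hg
        rw [if_neg (by omega : ¬(m ≤ 1 ∧ f ≤ 1)), if_pos (by omega : m ≤ 0 ∨ f ≤ 0 ∨ m = f)]
      · rw [if_neg hg]
        have hg' : aregood m f = true := by simpa using hg
        rcases aregood_true_cases hg' with ⟨h1, h2⟩ | ⟨hm, hf, hne⟩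
        · omega
        · rw [if_neg (by omega : ¬(m ≤ 1 ∧ f ≤ 1)), if_neg (by omega : ¬(m ≤ 0 ∨ f ≤ 0 ∨ m = f))]
          by_cases hmf : m > f
          · rw [if_pos hmf, if_pos hmf]
            have hd := PySem.Int.floordiv_mul_add_mod m f
            have harg : m - f * PySem.Int.floordiv m f = PySem.Int.mod m f := by
              have hd' : f * PySem.Int.floordiv m f + PySem.Int.mod m f = m := by
                rw [mul_comm]; exact hd
              omega
            rw [harg, ih]
          · rw [if_neg hmf, if_neg hmf]
            have hd := PySem.Int.floordiv_mul_add_mod f m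
            have harg : f - m * PySem.Int.floordiv f m = PySem.Int.mod f m := by
              have hd' : m * PySem.Int.floordiv f m + PySem.Int.mod f m = f := by
                rw [mul_comm]; exact hd
              omega
            rw [harg, ih]
    · rw [if_neg h, if_pos (by omega : m ≤ 1 ∧ f ≤ 1)]

-- ===== VERDICT (by name: the statement is the Claim_ definition above) =====
theorem solution_spec : Claim_equal_solution := by
  intro m f _hDom
  unfold Spec_solution solution solution_alt
  exact loop_eq_rec ((m + f).toNat + 1) m f (-1)
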